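-- pv_equiv track=rewrite | github.com/KingAndQueen/qichuan_orbi | tests/infrastructure/test_db_schema_consistency.py | format_error_report
-- ===== SOURCE A (Python) =====
-- def format_error_report(
--     missing_tables: list[str],
--     missing_columns: list[tuple[str, str]]
-- ) -> str:
--     """
--     Format a comprehensive error report for schema discrepancies.
--
--     Args:
--         missing_tables: List of missing table names
--         missing_columns: List of (table, column) tuples for missing columns
--
--     Returns:
--         Formatted error message string
--     """
--     lines = [
--         "",
--         "=" * 70,
--         "SCHEMA CONSISTENCY CHECK FAILED",
--         "=" * 70,
--     ]
--
--     total_issues = len(missing_tables) + len(missing_columns)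
--     lines.append(f"Found {total_issues} discrepancy(ies):")
--     lines.append("")
--
--     if missing_tables:
--         lines.append(f"MISSING TABLES ({len(missing_tables)}):")
--         for table in missing_tables:
--             lines.append(f"  - {table}")
--         lines.append("")
--
--     if missing_columns:
--         lines.append(f"MISSING COLUMNS ({len(missing_columns)}):")
--         # Group by table for readability
--         by_table: dict[str, list[str]] = {}
--         for table, column in missing_columns:
--             if table not in by_table:
--                 by_table[table] = []
--             by_table[table].append(column)
--
--         for table in sorted(by_table.keys()):
--             columns = by_table[table]
--             lines.append(f"  [{table}]")
--             for col in columns: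
--                 lines.append(f"    - {col}")
--         lines.append("")
--
--     lines.extend([
--         "=" * 70,
--         "ACTION REQUIRED:",
--         "  1. Run migrations to create missing tables/columns, OR",
--         "  2. Update EXPECTED_SCHEMA in this test file if schema changed intentionally",
--         "=" * 70,
--     ])
--
--     return "\n".join(lines)
-- ===== SOURCE B (Python) =====
-- def format_error_report(
--     missing_tables: list[str],
--     missing_columns: list[tuple[str, str]]
-- ) -> str:
--     """Format a comprehensive error report for schema discrepancies."""
--     eq = "=" * 70
--
--     tables_block = (
--         [f"MISSING TABLES ({len(missing_tables)}):"]
--         + [f"  - {t}" for t in missing_tables]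
--         + [""]
--     ) if missing_tables else []
--
--     cols_block = []
--     if missing_columns:
--         cols_block.append(f"MISSING COLUMNS ({len(missing_columns)}):")
--         for t in sorted({tab for tab, _ in missing_columns}):
--             cols_block.append(f"  [{t}]")
--             cols_block += [f"    - {c}" for tab, c in missing_columns if tab == t]
--         cols_block.append("")
--
--     total = len(missing_tables) + len(missing_columns)
--     return "\n".join(
--         ["", eq, "SCHEMA CONSISTENCY CHECK FAILED", eq,
--          f"Found {total} discrepancy(ies):", ""]
--         + tables_block
--         + cols_block
--         + [eq, "ACTION REQUIRED:",
--            "  1. Run migrations to create missing tables/columns, OR",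
--            "  2. Update EXPECTED_SCHEMA in this test file if schema changed intentionally",
--            eq]
--     )
-- ===== Notes on version B (the rewrite author's own statement) =====
-- stated objective: idiomatic
-- what changed: The columns section no longer builds a dict grouping then sorts its keys: B sorts the distinct table names once and emits each table's columns by filtering the original list, and assembles the whole report from comprehension-built blocks joined at the end.
import Mathlib
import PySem

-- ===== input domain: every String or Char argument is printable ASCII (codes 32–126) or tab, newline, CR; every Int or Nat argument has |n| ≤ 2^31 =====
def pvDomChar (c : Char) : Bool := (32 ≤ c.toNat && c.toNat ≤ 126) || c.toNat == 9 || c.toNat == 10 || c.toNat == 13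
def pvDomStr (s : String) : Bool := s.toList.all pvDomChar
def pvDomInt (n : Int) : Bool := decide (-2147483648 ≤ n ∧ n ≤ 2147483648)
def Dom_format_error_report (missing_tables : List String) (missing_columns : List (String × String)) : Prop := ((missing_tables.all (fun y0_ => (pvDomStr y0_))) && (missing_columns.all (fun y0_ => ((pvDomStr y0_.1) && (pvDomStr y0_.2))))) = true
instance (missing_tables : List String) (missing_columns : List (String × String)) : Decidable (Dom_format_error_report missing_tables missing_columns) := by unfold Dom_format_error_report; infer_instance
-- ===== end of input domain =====

-- B replaces A's dict-grouping of the columns section (hash-group then sort the keys) by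
-- sorting the distinct table names and filtering the columns per table; objective: idiomatic.

-- ===== PORT A =====

def pvEq70 : String := "======================================================================"
def format_error_report (missing_tables : List String) (missing_columns : List (String × String)) : String :=
  let lines : List String := ["", pvEq70, "SCHEMA CONSISTENCY CHECK FAILED", pvEq70]
  let total_issues : Int := missing_tables.length + missing_columns.length
  let lines := lines ++ ["Found " ++ PySem.Int.toStr total_issues ++ " discrepancy(ies):"]
  let lines := lines ++ [""]
  let lines :=
    if missing_tables.isEmpty then lines else
      let lines := lines ++ ["MISSING TABLES (" ++ PySem.Int.toStr (missing_tables.length : Int) ++ "):"]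
      let lines := missing_tables.foldl (fun acc table => acc ++ ["  - " ++ table]) lines
      lines ++ [""]
  let lines :=
    if missing_columns.isEmpty then lines else
      let lines := lines ++ ["MISSING COLUMNS (" ++ PySem.Int.toStr (missing_columns.length : Int) ++ "):"]
      let by_table : PySem.Dict String (List String) :=
        missing_columns.foldl
          (fun d p =>
            let d := if d.contains p.1 then d else d.insert p.1 []
            d.insert p.1 (d.getD p.1 [] ++ [p.2]))
          PySem.Dict.empty
      let lines :=
        (PySem.List.sorted by_table.keys (fun x => x) false).foldl
          (fun acc table =>
            (acc ++ ["  [" ++ table ++ "]"]) ++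
              (by_table.getD table []).map (fun col => "    - " ++ col))
          lines
      lines ++ [""]
  let lines := lines ++ [pvEq70, "ACTION REQUIRED:",
    "  1. Run migrations to create missing tables/columns, OR",
    "  2. Update EXPECTED_SCHEMA in this test file if schema changed intentionally",
    pvEq70]
  PySem.Str.join "\n" lines

-- ===== PORT B =====

def format_error_report_alt (missing_tables : List String) (missing_columns : List (String × String)) : String :=
  let eq : String := pvEq70
  let tables_block : List String :=
    if missing_tables.isEmpty then [] else
      ["MISSING TABLES (" ++ PySem.Int.toStr (missing_tables.length : Int) ++ "):"]
        ++ missing_tables.map (fun t => "  - " ++ t)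
        ++ [""]
  let cols_block : List String :=
    if missing_columns.isEmpty then [] else
      let cols_block := [("MISSING COLUMNS (" ++ PySem.Int.toStr (missing_columns.length : Int) ++ "):")]
      let cols_block :=
        (PySem.List.sorted (PySem.Set.ofList (missing_columns.map Prod.fst)) (fun x => x) false).foldl
          (fun acc t =>
            (acc ++ ["  [" ++ t ++ "]"]) ++
              (missing_columns.filter (fun p => p.1 == t)).map (fun p => "    - " ++ p.2))
          cols_block
      cols_block ++ [""]
  let total : Int := missing_tables.length + missing_columns.length
  PySem.Str.join "\n"
    (["", eq, "SCHEMA CONSISTENCY CHECK FAILED", eq,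
      "Found " ++ PySem.Int.toStr total ++ " discrepancy(ies):", ""]
      ++ tables_block
      ++ cols_block
      ++ [eq, "ACTION REQUIRED:",
          "  1. Run migrations to create missing tables/columns, OR",
          "  2. Update EXPECTED_SCHEMA in this test file if schema changed intentionally",
          eq])

-- ===== PRECONDITION & SPEC =====
def Spec_format_error_report (missing_tables : List String) (missing_columns : List (String × String)) (out : String) : Prop := out = format_error_report_alt missing_tables missing_columns
instance (missing_tables : List String) (missing_columns : List (String × String)) (out : String) : Decidable (Spec_format_error_report missing_tables missing_columns out) := by unfold Spec_format_error_report; infer_instance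

-- ===== CLAIM (what is proved, stated in full; the proofs are below) =====
def Claim_equal_format_error_report : Prop := ∀ (missing_tables : List String) (missing_columns : List (String × String)), Dom_format_error_report missing_tables missing_columns → Spec_format_error_report missing_tables missing_columns (format_error_report missing_tables missing_columns)

-- ===== LEMMAS AND PROOFS =====

theorem pv_step_eq_modify (d : PySem.Dict String (List String)) (p : String × String) :
    (let d' := if d.contains p.1 then d else d.insert p.1 [];
     d'.insert p.1 (d'.getD p.1 [] ++ [p.2])) = d.modify p.1 [] (· ++ [p.2]) := by
  simp only [PySem.Dict.modify]
  split_ifs with h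
  · rfl
  · have hc : d.contains p.1 = false := by simpa using h
    rw [PySem.Dict.insert_insert_self, PySem.Dict.getD_insert_self,
      PySem.Dict.getD_of_not_contains d [] hc]

theorem pv_by_table_eq (mc : List (String × String)) :
    mc.foldl
      (fun d p =>
        let d := if d.contains p.1 then d else d.insert p.1 []
        d.insert p.1 (d.getD p.1 [] ++ [p.2]))
      PySem.Dict.empty
    = mc.foldl (fun d p => d.modify p.1 [] (· ++ [p.2])) PySem.Dict.empty :=
  PySem.List.foldl_congr_mem mc _ _ _ (fun acc x _ => pv_step_eq_modify acc x)

theorem pv_keys_eq (mc : List (String × String)) :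
    (mc.foldl (fun d p => d.modify p.1 [] (· ++ [p.2])) PySem.Dict.empty).keys
    = PySem.Set.ofList (mc.map Prod.fst) := by
  rw [PySem.Dict.keys_foldl_modify_key mc Prod.fst [] (fun _ p xs => xs ++ [p.2]) PySem.Dict.empty]
  rfl

-- ===== VERDICT (by name: the statement is the Claim_ definition above) =====
theorem format_error_report_spec : Claim_equal_format_error_report := by
  intro mt mc _
  unfold Spec_format_error_report format_error_report format_error_report_alt
  simp only [pv_by_table_eq, pv_keys_eq, PySem.Dict.getD_foldl_modify_append,
    PySem.Dict.getD_empty, List.nil_append, List.map_map,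
    PySem.List.foldl_append_singleton_eq_map]
  simp only [List.append_assoc, List.singleton_append, PySem.List.foldl_append_eq_flatMap]
  split_ifs <;> simp [List.append_assoc, Function.comp_def]
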